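-- pv_equiv track=rewrite | github.com/Jzhou271/CS5001 | week 4/diagonal_number.py | diagonal_number
-- ===== SOURCE A (Python) =====
-- def diagonal_number(line_number):
--     '''
--     Takes a single integer to build the while loop. indicate that the
--     string has n lines with n number in the end of the first line, follow
--     by lines decrase with n-1 number until n = line = number = 1.
--     :param: int, the number of lines in a string
--     :return: str, diagonal numbers with number of lines
--     '''
--     ans = ""
--     while line_number > 0:
--         count = 1
--         while count <= line_number:
--             ans += str(count) + " "
--             count += 1
--         ans += "\n"
--         line_number -= 1
--     return ans
-- ===== SOURCE B (Python) =====
-- def diagonal_number(line_number):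
--     cur = ""
--     lines = []
--     for k in range(1, line_number + 1):
--         cur += str(k) + " "
--         lines.append(cur + "\n")
--     return "".join(reversed(lines))
-- ===== Notes on version B (the rewrite author's own statement) =====
-- stated objective: faster
-- what changed: Replaces A's nested while loops (each line recomputed digit-by-digit from 1 by an inner loop, appended piecewise onto one ever-growing result string) with a single ascending pass that extends one running prefix string, collects each line in a list, and joins the collected lines in reversed order.
import Mathlib
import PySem

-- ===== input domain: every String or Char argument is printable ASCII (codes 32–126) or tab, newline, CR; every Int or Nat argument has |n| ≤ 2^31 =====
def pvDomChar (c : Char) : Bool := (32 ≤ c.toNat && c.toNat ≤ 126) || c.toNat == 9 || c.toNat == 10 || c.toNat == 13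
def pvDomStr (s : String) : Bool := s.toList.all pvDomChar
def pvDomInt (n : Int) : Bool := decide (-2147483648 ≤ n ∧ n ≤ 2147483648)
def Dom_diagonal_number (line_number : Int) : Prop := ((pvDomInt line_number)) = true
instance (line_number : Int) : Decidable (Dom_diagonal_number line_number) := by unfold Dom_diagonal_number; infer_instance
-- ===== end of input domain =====

-- B replaces A's nested while loops by one ascending pass that extends a running prefix
-- and joins the collected lines in reversed order (objective: alternative decomposition).

-- ===== PORT A =====
-- inner while loop: ans += str(count) + " "; count += 1
def dnInner (lim count : Int) (ans : String) : String :=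
  if count ≤ lim then dnInner lim (count + 1) (ans ++ (PySem.Int.toStr count ++ " ")) else ans
termination_by (lim + 1 - count).toNat
decreasing_by omega

-- outer while loop: build a line, append "\n", line_number -= 1
def dnOuter (ln : Int) (ans : String) : String :=
  if ln > 0 then dnOuter (ln - 1) (dnInner ln 1 ans ++ "\n") else ans
termination_by ln.toNat
decreasing_by omega

def diagonal_number (line_number : Int) : String := dnOuter line_number ""

-- ===== PORT B =====
-- loop body: cur += str(k) + " "; lines.append(cur + "\n")
def dnStep (st : String × List String) (k : Int) : String × List String :=
  let cur := st.1 ++ (PySem.Int.toStr k ++ " ")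
  (cur, st.2 ++ [cur ++ "\n"])

def diagonal_number_alt (line_number : Int) : String :=
  let st := (PySem.List.pyRange 1 (line_number + 1) 1).foldl dnStep ("", [])
  PySem.Str.join "" st.2.reverse

-- ===== PRECONDITION & SPEC =====
def Spec_diagonal_number (line_number : Int) (out : String) : Prop := out = diagonal_number_alt line_number
instance (line_number : Int) (out : String) : Decidable (Spec_diagonal_number line_number out) := by unfold Spec_diagonal_number; infer_instance

-- ===== CLAIM (what is proved, stated in full; the proofs are below) =====
def Claim_equal_diagonal_number : Prop := ∀ (line_number : Int), Dom_diagonal_number line_number → Spec_diagonal_number line_number (diagonal_number line_number)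

-- ===== LEMMAS AND PROOFS =====

-- reference shapes: the prefix "1 2 … m ", the collected lines, and A's whole output
def dnPfx : Nat → String
  | 0 => ""
  | m + 1 => dnPfx m ++ (PySem.Int.toStr ((m : Int) + 1) ++ " ")

def dnLns : Nat → List String
  | 0 => []
  | m + 1 => dnLns m ++ [dnPfx (m + 1) ++ "\n"]

def dnAref : Nat → String
  | 0 => ""
  | m + 1 => (dnPfx (m + 1) ++ "\n") ++ dnAref m

theorem dnInner_base (lim count : Int) (h : lim < count) (ans : String) :
    dnInner lim count ans = ans := by
  rw [dnInner, if_neg (by omega)]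

theorem dnInner_last : ∀ (n : Nat) (lim count : Int), (lim - count).toNat = n → count ≤ lim →
    ∀ ans : String, dnInner lim count ans = dnInner (lim - 1) count ans ++ (PySem.Int.toStr lim ++ " ") := by
  intro n
  induction n with
  | zero =>
    intro lim count hn hle ans
    have hc : count = lim := by omega
    subst hc
    rw [dnInner, if_pos (le_refl _), dnInner_base _ _ (by omega), dnInner_base _ _ (by omega)]
  | succ k ih =>
    intro lim count hn hle ans
    have hlt : count < lim := by omega
    rw [dnInner, if_pos hle]
    rw [ih lim (count + 1) (by omega) (by omega)]
    conv_rhs => rw [dnInner]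
    rw [if_pos (show count ≤ lim - 1 by omega)]

theorem dnInner_pfx : ∀ (m : Nat) (ans : String), dnInner (m : Int) 1 ans = ans ++ dnPfx m := by
  intro m
  induction m with
  | zero => intro ans; rw [dnInner_base _ _ (by omega)]; simp [dnPfx]
  | succ k ih =>
    intro ans
    have hc : ((k + 1 : Nat) : Int) = (k : Int) + 1 := by push_cast; ring
    rw [hc, dnInner_last (((k : Int) + 1 - 1).toNat) _ 1 rfl (by omega)]
    have h1 : (k : Int) + 1 - 1 = (k : Int) := by omega
    rw [h1, ih]
    simp [dnPfx, String.append_assoc]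

theorem dnOuter_aref : ∀ (n : Nat) (ans : String), dnOuter (n : Int) ans = ans ++ dnAref n := by
  intro n
  induction n with
  | zero => intro ans; rw [dnOuter, if_neg (by omega)]; simp [dnAref]
  | succ k ih =>
    intro ans
    rw [dnOuter, if_pos (by push_cast; omega)]
    have h1 : ((k + 1 : Nat) : Int) - 1 = (k : Int) := by push_cast; omega
    rw [h1, ih, dnInner_pfx]
    simp [dnAref, String.append_assoc]

theorem dnFold_state : ∀ (n : Nat),
    (PySem.List.pyRange 1 ((n : Int) + 1) 1).foldl dnStep ("", []) = (dnPfx n, dnLns n) := by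
  intro n
  induction n with
  | zero => rw [PySem.List.pyRange_one_eq_nil (by omega)]; simp [dnPfx, dnLns]
  | succ k ih =>
    have h1 : ((k + 1 : Nat) : Int) + 1 = ((k : Int) + 1) + 1 := by push_cast; ring
    rw [h1, PySem.List.pyRange_one_succ_right (by omega), List.foldl_append, ih]
    simp [dnStep, dnPfx, dnLns]

theorem join_empty_nil : PySem.Str.join "" [] = "" := by
  simp [PySem.Str.join, PySem.Chars.join, List.intercalate]

theorem join_empty_cons (s : String) (l : List String) :
    PySem.Str.join "" (s :: l) = s ++ PySem.Str.join "" l := by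
  cases l with
  | nil => simp [PySem.Str.join, PySem.Chars.join, List.intercalate]
  | cons t ts =>
    simp [PySem.Str.join, PySem.Chars.join, List.intercalate]

theorem join_lns : ∀ (m : Nat), PySem.Str.join "" (dnLns m).reverse = dnAref m := by
  intro m
  induction m with
  | zero => simp [dnLns, dnAref, join_empty_nil]
  | succ k ih =>
    have : (dnLns (k + 1)).reverse = (dnPfx (k + 1) ++ "\n") :: (dnLns k).reverse := by
      simp [dnLns]
    rw [this, join_empty_cons, ih, dnAref]

-- ===== VERDICT (by name: the statement is the Claim_ definition above) =====
theorem diagonal_number_spec : Claim_equal_diagonal_number := by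
  intro n _
  unfold Spec_diagonal_number diagonal_number diagonal_number_alt
  by_cases h : 0 ≤ n
  · obtain ⟨m, rfl⟩ : ∃ m : Nat, n = (m : Int) := ⟨n.toNat, (Int.toNat_of_nonneg h).symm⟩
    rw [dnOuter_aref, dnFold_state]
    simp [join_lns]
  · rw [dnOuter, if_neg (by omega), PySem.List.pyRange_one_eq_nil (by omega)]
    simp [join_empty_nil]
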